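-- pv_equiv track=rewrite | github.com/alicesilva/P1-Python-Problemas | analytics_votacao.py | conta_votos
-- ===== SOURCE A (Python) =====
-- def conta_votos(votacoes,id_prop):
-- 	cont_sim = 0
-- 	cont_nao = 0
-- 	resultados = []
-- 	for i in range(len(votacoes)):
-- 		dados = votacoes[i].split(",")
-- 		if dados[1] == str(id_prop) and dados[4] == "sim":
-- 			cont_sim += 1
-- 		elif dados[1] == str(id_prop) and dados[4] == "nao":
-- 			cont_nao += 1
--
-- 	resultados.append(cont_sim)
-- 	resultados.append(cont_nao)
--
-- 	return resultados
-- ===== SOURCE B (Python) =====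
-- def conta_votos(votacoes, id_prop):
--     sid = str(id_prop)
--     votes = [v.split(",")[4] for v in votacoes if v.split(",")[1] == sid]
--     return [votes.count("sim"), votes.count("nao")]
-- ===== Notes on version B (the rewrite author's own statement) =====
-- stated objective: idiomatic
-- what changed: B replaces A's single loop with two scalar counters by staged passes: first a comprehension projects the vote field of the records matching str(id_prop), then the two answers are obtained with list.count over that projected list.
import Mathlib
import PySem

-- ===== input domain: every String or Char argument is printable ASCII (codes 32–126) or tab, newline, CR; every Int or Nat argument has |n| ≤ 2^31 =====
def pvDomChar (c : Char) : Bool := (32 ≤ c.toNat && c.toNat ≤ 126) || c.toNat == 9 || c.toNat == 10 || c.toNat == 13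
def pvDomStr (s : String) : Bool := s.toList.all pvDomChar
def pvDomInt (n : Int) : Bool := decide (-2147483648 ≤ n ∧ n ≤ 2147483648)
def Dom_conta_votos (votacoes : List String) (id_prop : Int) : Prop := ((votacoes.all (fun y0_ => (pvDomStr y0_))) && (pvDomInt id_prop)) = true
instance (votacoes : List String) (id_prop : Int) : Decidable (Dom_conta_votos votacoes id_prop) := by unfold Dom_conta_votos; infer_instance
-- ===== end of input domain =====

-- B replaces A's single loop with two scalar counters by staged passes: a comprehension
-- projecting the vote field of the matching records, then two list.count reads (idiomatic).

-- ===== PORT A =====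
-- A: one loop, two counters cont_sim/cont_nao, incremented when fields 1 and 4 match.
def conta_votos (votacoes : List String) (id_prop : Int) : List Int :=
  let r := votacoes.foldl (fun (c : Int × Int) v =>
    let dados := (PySem.Str.split? v ",").getD []
    if (PySem.List.pyGet? dados 1).getD "" = PySem.Int.toStr id_prop ∧
       (PySem.List.pyGet? dados 4).getD "" = "sim" then (c.1 + 1, c.2)
    else if (PySem.List.pyGet? dados 1).getD "" = PySem.Int.toStr id_prop ∧
            (PySem.List.pyGet? dados 4).getD "" = "nao" then (c.1, c.2 + 1)
    else c) (0, 0)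
  [r.1, r.2]

-- ===== PORT B =====
-- B: comprehension (filter + map) projecting field 4 of the matching records, then two counts.
def conta_votos_alt (votacoes : List String) (id_prop : Int) : List Int :=
  let sid := PySem.Int.toStr id_prop
  let votes := (votacoes.filter (fun v =>
      (PySem.List.pyGet? ((PySem.Str.split? v ",").getD []) 1).getD "" = sid)).map
    (fun v => (PySem.List.pyGet? ((PySem.Str.split? v ",").getD []) 4).getD "")
  [(votes.count "sim" : Int), (votes.count "nao" : Int)]

-- ===== PRECONDITION & SPEC =====
-- Pre_ excludes exactly the inputs on which the Python A raises IndexError: a record whose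
-- comma-split has fewer than 2 fields, or a record matching id_prop with fewer than 5 fields.
def Pre_conta_votos (votacoes : List String) (id_prop : Int) : Prop :=
  ∀ v ∈ votacoes, 2 ≤ ((PySem.Str.split? v ",").getD []).length ∧
    ((PySem.List.pyGet? ((PySem.Str.split? v ",").getD []) 1).getD "" = PySem.Int.toStr id_prop →
      5 ≤ ((PySem.Str.split? v ",").getD []).length)
instance (votacoes : List String) (id_prop : Int) : Decidable (Pre_conta_votos votacoes id_prop) := by
  unfold Pre_conta_votos; infer_instance

def pvWitness_conta_votos : List String × Int := (["4321,10,2018,civil,sim", "1,11,2018,x,nao"], 10)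

def Spec_conta_votos (votacoes : List String) (id_prop : Int) (out : List Int) : Prop := out = conta_votos_alt votacoes id_prop
instance (votacoes : List String) (id_prop : Int) (out : List Int) : Decidable (Spec_conta_votos votacoes id_prop out) := by unfold Spec_conta_votos; infer_instance

-- ===== CLAIM (what is proved, stated in full; the proofs are below) =====
def Claim_equal_conta_votos : Prop := ∀ (votacoes : List String) (id_prop : Int), Dom_conta_votos votacoes id_prop → Pre_conta_votos votacoes id_prop → Spec_conta_votos votacoes id_prop (conta_votos votacoes id_prop)

-- ===== LEMMAS AND PROOFS =====

-- A's counter loop equals the counts of "sim"/"nao" in B's projected list, offset by the start.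
theorem conta_votos_loop (sid : String) (votacoes : List String) :
    ∀ (a b : Int),
      votacoes.foldl (fun (c : Int × Int) v =>
          let dados := (PySem.Str.split? v ",").getD []
          if (PySem.List.pyGet? dados 1).getD "" = sid ∧
             (PySem.List.pyGet? dados 4).getD "" = "sim" then (c.1 + 1, c.2)
          else if (PySem.List.pyGet? dados 1).getD "" = sid ∧
                  (PySem.List.pyGet? dados 4).getD "" = "nao" then (c.1, c.2 + 1)
          else c) (a, b) =
      (a + (((votacoes.filter (fun v =>
              (PySem.List.pyGet? ((PySem.Str.split? v ",").getD []) 1).getD "" = sid)).map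
            (fun v => (PySem.List.pyGet? ((PySem.Str.split? v ",").getD []) 4).getD "")).count "sim" : Int),
       b + (((votacoes.filter (fun v =>
              (PySem.List.pyGet? ((PySem.Str.split? v ",").getD []) 1).getD "" = sid)).map
            (fun v => (PySem.List.pyGet? ((PySem.Str.split? v ",").getD []) 4).getD "")).count "nao" : Int)) := by
  induction votacoes with
  | nil => intro a b; simp
  | cons v rest ih =>
    intro a b
    simp only [List.foldl_cons]
    by_cases h1 : (PySem.List.pyGet? ((PySem.Str.split? v ",").getD []) 1).getD "" = sid
    · by_cases h4s : (PySem.List.pyGet? ((PySem.Str.split? v ",").getD []) 4).getD "" = "sim"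
      · simp only [h1, h4s, and_self, if_pos, ih, List.filter_cons, decide_true,
          if_true, List.map_cons, List.count_cons]
        simp only [h4s, Prod.mk.injEq]
        constructor <;> simp <;> omega
      · by_cases h4n : (PySem.List.pyGet? ((PySem.Str.split? v ",").getD []) 4).getD "" = "nao"
        · simp only [h1, h4s, h4n, and_true, true_and, and_false, if_false, if_pos, ih,
            List.filter_cons, decide_true, if_true, List.map_cons, List.count_cons]
          simp only [h4n, Prod.mk.injEq]
          constructor <;> simp [h4s] <;> omega
        · simp only [h1, h4s, h4n, and_false, if_false, ih]
          simp [h1, h4s, h4n, List.count_cons]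
    · simp only [h1, false_and, if_false, ih]
      simp [h1]

-- ===== VERDICT (by name: the statement is the Claim_ definition above) =====
theorem conta_votos_spec : Claim_equal_conta_votos := by
  intro votacoes id_prop _ _
  unfold Spec_conta_votos conta_votos conta_votos_alt
  simp only [conta_votos_loop (PySem.Int.toStr id_prop) votacoes 0 0]
  simp
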